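-- pv_equiv track=rewrite | github.com/sntrblck-sudo/no1r | scripts/build_ops_log_bundle.py | collect_recent_errors
-- ===== SOURCE A (Python) =====
-- def collect_recent_errors(tail: str | None) -> list[str]:
--     if not tail:
--         return []
--     errors = []
--     for line in tail.splitlines():
--         if any(token in line.lower() for token in ("error", "failed", "alert")):
--             errors.append(line.strip())
--     return errors[-10:]
-- ===== SOURCE B (Python) =====
-- def collect_recent_errors(tail):
--     if not tail:
--         return []
--     buf = []
--     for line in reversed(tail.splitlines()):
--         low = line.lower()
--         if "error" in low or "failed" in low or "alert" in low:
--             buf.append(line.strip())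
--             if len(buf) == 10:
--                 break
--     return buf[::-1]
-- ===== Notes on version B (the rewrite author's own statement) =====
-- stated objective: alternative
-- what changed: B scans the lines in reverse, collecting at most 10 stripped matching lines with an early break, then reverses the buffer, instead of A's full forward filter followed by a [-10:] slice.
import Mathlib
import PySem

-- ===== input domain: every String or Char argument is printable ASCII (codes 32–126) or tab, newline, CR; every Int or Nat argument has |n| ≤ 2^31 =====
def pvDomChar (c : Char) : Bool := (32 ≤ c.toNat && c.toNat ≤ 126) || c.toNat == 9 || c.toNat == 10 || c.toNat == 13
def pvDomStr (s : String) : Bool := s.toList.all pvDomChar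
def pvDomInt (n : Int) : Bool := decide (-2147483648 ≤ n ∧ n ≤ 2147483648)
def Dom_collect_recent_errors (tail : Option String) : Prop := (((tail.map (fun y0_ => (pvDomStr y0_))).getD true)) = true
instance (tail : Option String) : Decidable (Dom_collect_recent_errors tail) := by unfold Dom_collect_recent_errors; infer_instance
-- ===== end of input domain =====

-- B scans the lines in reverse, collecting at most 10 stripped matches with an early break, then
-- reverses the buffer — an alternative decomposition of A's forward filter + [-10:] slice.


-- ===== PORT A =====
-- any(token in line.lower() for token in ("error", "failed", "alert"))
def pvHasErrToken (line : String) : Bool :=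
  PySem.Str.isIn "error" (PySem.Str.lower line) ||
  PySem.Str.isIn "failed" (PySem.Str.lower line) ||
  PySem.Str.isIn "alert" (PySem.Str.lower line)

def collect_recent_errors (tail : Option String) : List String :=
  match tail with
  | none => []
  | some t =>
    if t = "" then []
    else
      let errors := (PySem.Str.splitlines t).foldl
        (fun errors line =>
          if pvHasErrToken line then errors ++ [PySem.Str.strip line] else errors) []
      PySem.List.slice errors (some (-10)) none

-- ===== PORT B =====
-- reverse scan with a buffer capped at 10 (the 'break' is the early return at length 10)
def pvAltLoop : List String → List String → List String
  | [], buf => buf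
  | line :: rest, buf =>
    let low := PySem.Str.lower line
    if PySem.Str.isIn "error" low || PySem.Str.isIn "failed" low || PySem.Str.isIn "alert" low then
      let buf' := buf ++ [PySem.Str.strip line]
      if buf'.length == 10 then buf' else pvAltLoop rest buf'
    else pvAltLoop rest buf

def collect_recent_errors_alt (tail : Option String) : List String :=
  match tail with
  | none => []
  | some t =>
    if t = "" then []
    else (pvAltLoop (PySem.Str.splitlines t).reverse []).reverse

-- ===== PRECONDITION & SPEC =====
def Spec_collect_recent_errors (tail : Option String) (out : List String) : Prop := out = collect_recent_errors_alt tail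
instance (tail : Option String) (out : List String) : Decidable (Spec_collect_recent_errors tail out) := by unfold Spec_collect_recent_errors; infer_instance

-- ===== CLAIM (what is proved, stated in full; the proofs are below) =====
def Claim_equal_collect_recent_errors : Prop := ∀ (tail : Option String), Dom_collect_recent_errors tail → Spec_collect_recent_errors tail (collect_recent_errors tail)

-- ===== LEMMAS AND PROOFS =====

-- the loop collects (up to capacity) the stripped matches of xs after buf
theorem pvAltLoop_eq (xs : List String) (buf : List String) (h : buf.length < 10) :
    pvAltLoop xs buf =
      buf ++ ((xs.filter pvHasErrToken).map PySem.Str.strip).take (10 - buf.length) := by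
  induction xs generalizing buf with
  | nil => simp [pvAltLoop]
  | cons line rest ih =>
    have htest : (PySem.Str.isIn "error" (PySem.Str.lower line) ||
        PySem.Str.isIn "failed" (PySem.Str.lower line) ||
        PySem.Str.isIn "alert" (PySem.Str.lower line)) = pvHasErrToken line := rfl
    simp only [pvAltLoop, htest, List.filter_cons]
    by_cases hc : pvHasErrToken line
    · rw [if_pos hc, if_pos hc, List.map_cons,
        show (10 - buf.length) = (10 - (buf.length + 1)) + 1 from by omega, List.take_succ_cons]
      by_cases h10 : buf.length + 1 = 10
      · rw [if_pos (by simp [h10])]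
        simp [show 10 - (buf.length + 1) = 0 from by omega]
      · rw [if_neg (by simp; omega), ih _ (by simp; omega)]
        simp
    · rw [if_neg hc, if_neg hc, ih _ h]

-- ===== VERDICT (by name: the statement is the Claim_ definition above) =====
theorem collect_recent_errors_spec : Claim_equal_collect_recent_errors := by
  intro tail _
  unfold Spec_collect_recent_errors collect_recent_errors collect_recent_errors_alt
  match tail with
  | none => rfl
  | some t =>
    by_cases ht : t = ""
    · simp [ht]
    · simp only [if_neg ht]
      rw [pvAltLoop_eq _ [] (by simp)]
      rw [PySem.List.foldl_append_if, PySem.List.slice_from_neg_ofNat _ 10 (by omega)]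
      simp [List.take_reverse, List.length_map]
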